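-- pv_equiv track=rewrite | github.com/dqii/pgconf-eu-demo | process1_commits_and_file_parts.py | is_acceptable_file
-- ===== SOURCE A (Python) =====
-- def is_acceptable_file(file_name):
--     ACCEPTABLE_SUFFIXES = [
--         '.py', '.js', '.java', '.rb', '.go', '.rs', '.json',
--         '.yaml', '.yml', '.xml', '.md', '.txt', '.sh', '.sql', '.ts', '.h', '.c', '.cpp', '.hpp', '.php', '.jsx', '.tsx', '.swift', '.kt', '.cs', '.out'
--     ]
--     ACCEPTABLE_FILENAMES = {'Makefile', 'Dockerfile', '.env'}
--     return (
--         any(file_name.endswith(suffix) for suffix in ACCEPTABLE_SUFFIXES) or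
--         file_name in ACCEPTABLE_FILENAMES
--     )
-- ===== SOURCE B (Python) =====
-- def is_acceptable_file(file_name):
--     ACCEPTABLE_EXTENSIONS = {
--         'py', 'js', 'java', 'rb', 'go', 'rs', 'json',
--         'yaml', 'yml', 'xml', 'md', 'txt', 'sh', 'sql', 'ts', 'h', 'c',
--         'cpp', 'hpp', 'php', 'jsx', 'tsx', 'swift', 'kt', 'cs', 'out'
--     }
--     if file_name in {'Makefile', 'Dockerfile', '.env'}:
--         return True
--     # single reverse scan: collect the characters after the last dot
--     ext = []
--     for ch in reversed(file_name):
--         if ch == '.':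
--             return ''.join(reversed(ext)) in ACCEPTABLE_EXTENSIONS
--         ext.append(ch)
--     return False
-- ===== Notes on version B (the rewrite author's own statement) =====
-- stated objective: alternative
-- what changed: Instead of scanning the filename 26 times with endswith (one pass per dotted suffix), B checks the literal-names set first and then makes a single reverse scan of the filename that collects the characters after the last dot and tests that bare extension against a dot-free set.
import Mathlib
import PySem

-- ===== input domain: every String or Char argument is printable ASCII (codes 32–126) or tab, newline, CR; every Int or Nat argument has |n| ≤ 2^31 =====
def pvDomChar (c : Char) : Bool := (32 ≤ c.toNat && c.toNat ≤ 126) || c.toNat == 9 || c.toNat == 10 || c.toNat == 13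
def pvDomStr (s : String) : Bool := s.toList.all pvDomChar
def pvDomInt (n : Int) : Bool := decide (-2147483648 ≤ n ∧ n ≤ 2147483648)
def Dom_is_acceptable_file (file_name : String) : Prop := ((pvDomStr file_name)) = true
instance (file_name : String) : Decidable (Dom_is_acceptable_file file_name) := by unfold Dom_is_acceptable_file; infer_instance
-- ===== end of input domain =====

-- B replaces A's 26 endswith scans by one reverse scan that collects the characters
-- after the last dot and tests that bare extension against a dot-free set; same value everywhere.

-- ===== PORT A =====
def is_acceptable_file (file_name : String) : Bool :=
  let ACCEPTABLE_SUFFIXES : List String := [".py", ".js", ".java", ".rb", ".go", ".rs", ".json", ".yaml", ".yml", ".xml", ".md", ".txt", ".sh", ".sql", ".ts", ".h", ".c", ".cpp", ".hpp", ".php", ".jsx", ".tsx", ".swift", ".kt", ".cs", ".out"]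
  let ACCEPTABLE_FILENAMES : PySem.Set String := PySem.Set.ofList ["Makefile", "Dockerfile", ".env"]
  ACCEPTABLE_SUFFIXES.any (fun suffix => PySem.Str.endswith file_name suffix)
    || PySem.Set.contains ACCEPTABLE_FILENAMES file_name

-- ===== PORT B =====
-- hand port of Source B's reverse for-loop: Python appends to `ext` and joins reversed(ext),
-- which is exactly a cons-accumulator over the reversed character list.
def pvScanExt (exts : PySem.Set String) : List Char → List Char → Bool
  | [], _ => false
  | c :: rest, ext => if c = '.' then PySem.Set.contains exts (String.ofList ext) else pvScanExt exts rest (c :: ext)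

def is_acceptable_file_alt (file_name : String) : Bool :=
  let ACCEPTABLE_EXTENSIONS : PySem.Set String := PySem.Set.ofList ["py", "js", "java", "rb", "go", "rs", "json", "yaml", "yml", "xml", "md", "txt", "sh", "sql", "ts", "h", "c", "cpp", "hpp", "php", "jsx", "tsx", "swift", "kt", "cs", "out"]
  if PySem.Set.contains (PySem.Set.ofList ["Makefile", "Dockerfile", ".env"]) file_name then true
  else pvScanExt ACCEPTABLE_EXTENSIONS file_name.toList.reverse []

-- ===== PRECONDITION & SPEC =====
def Spec_is_acceptable_file (file_name : String) (out : Bool) : Prop := out = is_acceptable_file_alt file_name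
instance (file_name : String) (out : Bool) : Decidable (Spec_is_acceptable_file file_name out) := by unfold Spec_is_acceptable_file; infer_instance

-- ===== CLAIM (what is proved, stated in full; the proofs are below) =====
def Claim_equal_is_acceptable_file : Prop := ∀ (file_name : String), Dom_is_acceptable_file file_name → Spec_is_acceptable_file file_name (is_acceptable_file file_name)

-- ===== LEMMAS AND PROOFS =====

-- the scan loop computes: "there is a dot, and the characters after the last dot form an accepted extension"
theorem pvScanExt_spec (exts : PySem.Set String) (r : List Char) : ∀ acc,
    pvScanExt exts r acc =
      if '.' ∈ r then PySem.Set.contains exts (String.ofList ((r.takeWhile (fun c => !(c == '.'))).reverse ++ acc)) else false := by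
  induction r with
  | nil => intro acc; simp [pvScanExt]
  | cons c rest ih =>
    intro acc
    by_cases hc : c = '.'
    · subst hc; simp [pvScanExt]
    · simp [pvScanExt, hc, Ne.symm hc, ih (c :: acc), List.mem_cons]

theorem takeWhile_fill (p : Char → Bool) (v : List Char) (x : Char) (t : List Char)
    (hv : ∀ a ∈ v, p a = true) (hx : p x = false) : List.takeWhile p (v ++ x :: t) = v := by
  induction v with
  | nil => simp [hx]
  | cons a v ih =>
    have ha : p a = true := hv a (by simp)
    simp only [List.cons_append, List.takeWhile_cons, ha, if_true]
    rw [ih (fun b hb => hv b (by simp [hb]))]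

-- endswith('.w') for a dot-free w holds iff the string has a dot and the part after the LAST dot is w
theorem esw (l w : List Char) (hw : '.' ∉ w) :
    PySem.Chars.endswith l ('.'::w)
      = (l.contains '.' && ((l.reverse.takeWhile (fun c => !(c == '.'))).reverse == w)) := by
  rcases Bool.eq_false_or_eq_true (l.contains '.' && ((l.reverse.takeWhile (fun c => !(c == '.'))).reverse == w)) with hb | hb <;> rw [hb]
  · rw [Bool.and_eq_true] at hb
    obtain ⟨hd, htk⟩ := hb
    have hmem : '.' ∈ l := by simpa using hd
    have htk' : l.reverse.takeWhile (fun c => !(c == '.')) = w.reverse := by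
      have := beq_iff_eq.mp htk
      rw [← this]; simp
    rw [PySem.Chars.endswith_iff, ← List.reverse_prefix]
    have hdrop : l.reverse.dropWhile (fun c => !(c == '.')) ≠ [] := by
      rw [Ne, List.dropWhile_eq_nil_iff]
      intro hall
      have := hall '.' (List.mem_reverse.mpr hmem)
      simp at this
    obtain ⟨c, t, hct⟩ := List.exists_cons_of_ne_nil hdrop
    have hcdot : c = '.' := by
      have := List.head_dropWhile_not (fun c => !(c == '.')) hdrop
      simp only [hct, List.head_cons] at this
      simpa using this
    have hl : l.reverse = w.reverse ++ '.' :: t := by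
      conv_lhs => rw [← List.takeWhile_append_dropWhile (p := fun c => !(c == '.')) (l := l.reverse)]
      rw [htk', hct, hcdot]
    rw [hl, List.reverse_cons]
    exact ⟨t, by simp⟩
  · rw [← Bool.not_eq_true, PySem.Chars.endswith_iff]
    intro hsuf
    obtain ⟨p, hp⟩ := hsuf
    have hmem : '.' ∈ l := by subst hp; simp
    have htk : l.reverse.takeWhile (fun c => !(c == '.')) = w.reverse := by
      subst hp
      rw [List.reverse_append, List.reverse_cons, List.append_assoc, List.singleton_append]
      exact takeWhile_fill _ w.reverse '.' p.reverse
        (fun a ha => by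
          have hmemw : a ∈ w := List.mem_reverse.mp ha
          have hne : a ≠ '.' := fun h => hw (h ▸ hmemw)
          simp [hne]) (by simp)
    rw [Bool.and_eq_false_iff] at hb
    rcases hb with hb | hb
    · simp [hmem] at hb
    · rw [htk] at hb; simp at hb

theorem ofList_beq (e u : List Char) : (String.ofList e == String.ofList u) = (e == u) := by
  rcases Bool.eq_false_or_eq_true (e == u) with h | h <;> rw [h]
  · rw [beq_iff_eq, beq_iff_eq.mp h]
  · rw [beq_eq_false_iff_ne]; intro hc; exact (beq_eq_false_iff_ne.mp h) (String.ofList_inj.mp hc)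

theorem is_acceptable_file_eq_alt (s : String) : is_acceptable_file s = is_acceptable_file_alt s := by
  simp only [is_acceptable_file, is_acceptable_file_alt, List.any_cons, List.any_nil,
    PySem.Str.endswith_eq]
  rw [show (".py" : String).toList = '.' :: ['p', 'y'] from by decide, show (".js" : String).toList = '.' :: ['j', 's'] from by decide, show (".java" : String).toList = '.' :: ['j', 'a', 'v', 'a'] from by decide, show (".rb" : String).toList = '.' :: ['r', 'b'] from by decide, show (".go" : String).toList = '.' :: ['g', 'o'] from by decide, show (".rs" : String).toList = '.' :: ['r', 's'] from by decide, show (".json" : String).toList = '.' :: ['j', 's', 'o', 'n'] from by decide, show (".yaml" : String).toList = '.' :: ['y', 'a', 'm', 'l'] from by decide, show (".yml" : String).toList = '.' :: ['y', 'm', 'l'] from by decide, show (".xml" : String).toList = '.' :: ['x', 'm', 'l'] from by decide, show (".md" : String).toList = '.' :: ['m', 'd'] from by decide, show (".txt" : String).toList = '.' :: ['t', 'x', 't'] from by decide, show (".sh" : String).toList = '.' :: ['s', 'h'] from by decide, show (".sql" : String).toList = '.' :: ['s', 'q', 'l'] from by decide, show (".ts" : String).toList = '.' :: ['t', 's'] from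 by decide, show (".h" : String).toList = '.' :: ['h'] from by decide, show (".c" : String).toList = '.' :: ['c'] from by decide, show (".cpp" : String).toList = '.' :: ['c', 'p', 'p'] from by decide, show (".hpp" : String).toList = '.' :: ['h', 'p', 'p'] from by decide, show (".php" : String).toList = '.' :: ['p', 'h', 'p'] from by decide, show (".jsx" : String).toList = '.' :: ['j', 's', 'x'] from by decide, show (".tsx" : String).toList = '.' :: ['t', 's', 'x'] from by decide, show (".swift" : String).toList = '.' :: ['s', 'w', 'i', 'f', 't'] from by decide, show (".kt" : String).toList = '.' :: ['k', 't'] from by decide, show (".cs" : String).toList = '.' :: ['c', 's'] from by decide, show (".out" : String).toList = '.' :: ['o', 'u', 't'] from by decide]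
  rw [esw s.toList ['p', 'y'] (by decide), esw s.toList ['j', 's'] (by decide), esw s.toList ['j', 'a', 'v', 'a'] (by decide), esw s.toList ['r', 'b'] (by decide), esw s.toList ['g', 'o'] (by decide), esw s.toList ['r', 's'] (by decide), esw s.toList ['j', 's', 'o', 'n'] (by decide), esw s.toList ['y', 'a', 'm', 'l'] (by decide), esw s.toList ['y', 'm', 'l'] (by decide), esw s.toList ['x', 'm', 'l'] (by decide), esw s.toList ['m', 'd'] (by decide), esw s.toList ['t', 'x', 't'] (by decide), esw s.toList ['s', 'h'] (by decide), esw s.toList ['s', 'q', 'l'] (by decide), esw s.toList ['t', 's'] (by decide), esw s.toList ['h'] (by decide), esw s.toList ['c'] (by decide), esw s.toList ['c', 'p', 'p'] (by decide), esw s.toList ['h', 'p', 'p'] (by decide), esw s.toList ['p', 'h', 'p'] (by decide), esw s.toList ['j', 's', 'x'] (by decide), esw s.toList ['t', 's', 'x'] (by decide), esw s.toList ['s', 'w', 'i', 'f', 't'] (by decide), esw s.toList ['k', 't'] (by decide), esw s.toList ['c', 's'] (by decide), esw s.toList ['o', 'u', 't'] (by decide)]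
  rw [pvScanExt_spec]
  simp only [List.mem_reverse, List.append_nil]
  set pvExt := (s.toList.reverse.takeWhile (fun c => !(c == '.'))).reverse with hext
  rw [show PySem.Set.ofList ["py", "js", "java", "rb", "go", "rs", "json", "yaml", "yml", "xml", "md", "txt", "sh", "sql", "ts", "h", "c", "cpp", "hpp", "php", "jsx", "tsx", "swift", "kt", "cs", "out"] = (["py", "js", "java", "rb", "go", "rs", "json", "yaml", "yml", "xml", "md", "txt", "sh", "sql", "ts", "h", "c", "cpp", "hpp", "php", "jsx", "tsx", "swift", "kt", "cs", "out"] : List String) from by decide]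
  simp only [PySem.Set.contains, List.contains_cons, List.contains_nil]
  rw [show ("py" : String) = String.ofList ['p', 'y'] from rfl, show ("js" : String) = String.ofList ['j', 's'] from rfl, show ("java" : String) = String.ofList ['j', 'a', 'v', 'a'] from rfl, show ("rb" : String) = String.ofList ['r', 'b'] from rfl, show ("go" : String) = String.ofList ['g', 'o'] from rfl, show ("rs" : String) = String.ofList ['r', 's'] from rfl, show ("json" : String) = String.ofList ['j', 's', 'o', 'n'] from rfl, show ("yaml" : String) = String.ofList ['y', 'a', 'm', 'l'] from rfl, show ("yml" : String) = String.ofList ['y', 'm', 'l'] from rfl, show ("xml" : String) = String.ofList ['x', 'm', 'l'] from rfl, show ("md" : String) = String.ofList ['m', 'd'] from rfl, show ("txt" : String) = String.ofList ['t', 'x', 't'] from rfl, show ("sh" : String) = String.ofList ['s', 'h'] from rfl, show ("sql" : String) = String.ofList ['s', 'q', 'l'] from rfl, show ("ts" : String) = String.ofList ['t', 's'] from rfl, show ("h" : String) = String.ofList ['h'] from rfl, show ("c" : String) = String.ofList ['c'] from rfl, show ("cpp" : String) = String.ofList ['c', 'p', 'p'] from rfl, show ("hpp" : String) = String.ofList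 ['h', 'p', 'p'] from rfl, show ("php" : String) = String.ofList ['p', 'h', 'p'] from rfl, show ("jsx" : String) = String.ofList ['j', 's', 'x'] from rfl, show ("tsx" : String) = String.ofList ['t', 's', 'x'] from rfl, show ("swift" : String) = String.ofList ['s', 'w', 'i', 'f', 't'] from rfl, show ("kt" : String) = String.ofList ['k', 't'] from rfl, show ("cs" : String) = String.ofList ['c', 's'] from rfl, show ("out" : String) = String.ofList ['o', 'u', 't'] from rfl]
  rw [ofList_beq pvExt ['p', 'y'], ofList_beq pvExt ['j', 's'], ofList_beq pvExt ['j', 'a', 'v', 'a'], ofList_beq pvExt ['r', 'b'], ofList_beq pvExt ['g', 'o'], ofList_beq pvExt ['r', 's'], ofList_beq pvExt ['j', 's', 'o', 'n'], ofList_beq pvExt ['y', 'a', 'm', 'l'], ofList_beq pvExt ['y', 'm', 'l'], ofList_beq pvExt ['x', 'm', 'l'], ofList_beq pvExt ['m', 'd'], ofList_beq pvExt ['t', 'x', 't'], ofList_beq pvExt ['s', 'h'], ofList_beq pvExt ['s', 'q', 'l'], ofList_beq pvExt ['t', 's'], ofList_beq pvExt ['h'], ofList_beq pvExt ['c'], ofList_beq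 pvExt ['c', 'p', 'p'], ofList_beq pvExt ['h', 'p', 'p'], ofList_beq pvExt ['p', 'h', 'p'], ofList_beq pvExt ['j', 's', 'x'], ofList_beq pvExt ['t', 's', 'x'], ofList_beq pvExt ['s', 'w', 'i', 'f', 't'], ofList_beq pvExt ['k', 't'], ofList_beq pvExt ['c', 's'], ofList_beq pvExt ['o', 'u', 't']]
  rw [show s.toList.contains '.' = decide ('.' ∈ s.toList) from by simp]
  cases hD : decide ('.' ∈ s.toList)
  · have hm : ¬ ('.' ∈ s.toList) := by simpa using hD
    simp only [Bool.false_and, Bool.false_or, Bool.or_false]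
    simp [hm]
  · have hm : '.' ∈ s.toList := by simpa using hD
    simp only [Bool.true_and]
    cases hN : List.contains (PySem.Set.ofList ["Makefile", "Dockerfile", ".env"]) s
    · simp [hm]
    · simp

-- ===== VERDICT (by name: the statement is the Claim_ definition above) =====
theorem is_acceptable_file_spec : Claim_equal_is_acceptable_file := by
  intro file_name _
  show is_acceptable_file file_name = is_acceptable_file_alt file_name
  exact is_acceptable_file_eq_alt file_name
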